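-- pv_equiv track=rewrite | github.com/lbormann/darts-caller | darts-caller.py | grab_caller_language
-- ===== SOURCE A (Python) =====
-- CALLER_LANGUAGES = {
--     1: ['english', 'en', ],
--     2: ['french', 'fr', ],
--     3: ['russian', 'ru', ],
--     4: ['german', 'de', ],
--     5: ['spanish', 'es', ],
--     6: ['dutch', 'nl', ],
--     7: ['italian', 'it', ],
-- }
--
-- def grab_caller_language(caller_name):
--     first_occurrences = []
--     caller_name = '-' + caller_name + '-'
--     for key in CALLER_LANGUAGES:
--         for tag in CALLER_LANGUAGES[key]:
--             tag_with_dashes = '-' + tag + '-'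
--             index = caller_name.find(tag_with_dashes)
--             if index != -1:  # find returns -1 if the tag is not found
--                 first_occurrences.append((index, key))
--
--     if not first_occurrences:  # if the list is empty
--         return None
--
--     # Sort the list of first occurrences and get the language of the tag that appears first
--     first_occurrences.sort(key=lambda x: x[0])
--     return first_occurrences[0][1]
-- ===== SOURCE B (Python) =====
-- CALLER_LANGUAGES = {
--     1: ['english', 'en', ],
--     2: ['french', 'fr', ],
--     3: ['russian', 'ru', ],
--     4: ['german', 'de', ],
--     5: ['spanish', 'es', ],
--     6: ['dutch', 'nl', ],
--     7: ['italian', 'it', ],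
-- }
--
-- TAG_TO_KEY = {tag: key for key, tags in CALLER_LANGUAGES.items() for tag in tags}
--
-- def grab_caller_language(caller_name):
--     # walk the name's '-'-separated tokens left to right; the first one that is
--     # a known tag decides the language
--     for token in ('-' + caller_name + '-').split('-'):
--         if token in TAG_TO_KEY:
--             return TAG_TO_KEY[token]
--     return None
-- ===== Notes on version B (the rewrite author's own statement) =====
-- stated objective: idiomatic
-- what changed: Replaces the per-tag substring find over the whole name plus a sort of (index, key) pairs by a single left-to-right walk over the name's dash-separated tokens with a precomputed tag-to-key reverse dict; the first token that is a known tag decides.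
import Mathlib
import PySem

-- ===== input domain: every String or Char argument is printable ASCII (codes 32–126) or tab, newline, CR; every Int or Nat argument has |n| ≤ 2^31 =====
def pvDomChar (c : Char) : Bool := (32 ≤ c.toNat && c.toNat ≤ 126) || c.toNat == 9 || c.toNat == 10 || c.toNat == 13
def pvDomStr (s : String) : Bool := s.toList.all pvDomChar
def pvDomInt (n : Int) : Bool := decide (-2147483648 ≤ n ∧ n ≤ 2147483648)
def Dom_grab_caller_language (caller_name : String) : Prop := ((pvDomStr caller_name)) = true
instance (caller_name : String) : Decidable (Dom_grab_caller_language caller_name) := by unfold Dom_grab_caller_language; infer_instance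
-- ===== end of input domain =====

-- B replaces A's per-tag substring search plus sort of (index, key) pairs by one
-- left-to-right walk over the name's dash-separated tokens with a reverse tag→key dict
-- (idiomatic: one pass over the tokens instead of 14 whole-name scans and a sort).

-- ===== PORT A =====
def pvCallerLanguages : List (Int × List (List Char)) :=
  [ (1, ["english".toList, "en".toList])
  , (2, ["french".toList,  "fr".toList])
  , (3, ["russian".toList, "ru".toList])
  , (4, ["german".toList,  "de".toList])
  , (5, ["spanish".toList, "es".toList])
  , (6, ["dutch".toList,   "nl".toList])
  , (7, ["italian".toList, "it".toList]) ]

def grab_caller_language (caller_name : String) : Option Int :=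
  let cn : List Char := '-' :: caller_name.toList ++ ['-']
  let first_occurrences : List (Int × Int) :=
    pvCallerLanguages.foldl (fun acc kv =>
      kv.2.foldl (fun acc tag =>
        let tag_with_dashes : List Char := '-' :: tag ++ ['-']
        let index := PySem.Chars.find cn tag_with_dashes
        if index ≠ -1 then acc ++ [(index, kv.1)] else acc) acc) []
  if first_occurrences = [] then none
  else (PySem.List.pyGet? (PySem.List.sorted first_occurrences (fun x => x.1) false) 0).map (fun x => x.2)

-- ===== PORT B =====
def pvPairsL : List (List Char × Int) :=
  [ ("english".toList, 1), ("en".toList, 1)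
  , ("french".toList, 2),  ("fr".toList, 2)
  , ("russian".toList, 3), ("ru".toList, 3)
  , ("german".toList, 4),  ("de".toList, 4)
  , ("spanish".toList, 5), ("es".toList, 5)
  , ("dutch".toList, 6),   ("nl".toList, 6)
  , ("italian".toList, 7), ("it".toList, 7) ]

def pvTagToKey : PySem.Dict (List Char) Int := PySem.Dict.mk pvPairsL

def pvFirstTag : List (List Char) → Option Int
  | [] => none
  | t :: ts =>
    match pvTagToKey.get? t with
    | some k => some k
    | none => pvFirstTag ts

def grab_caller_language_alt (caller_name : String) : Option Int :=
  pvFirstTag (PySem.Chars.splitOn ('-' :: caller_name.toList ++ ['-']) ['-'])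

-- ===== PRECONDITION & SPEC =====
def Spec_grab_caller_language (caller_name : String) (out : Option Int) : Prop := out = grab_caller_language_alt caller_name
instance (caller_name : String) (out : Option Int) : Decidable (Spec_grab_caller_language caller_name out) := by unfold Spec_grab_caller_language; infer_instance

-- ===== CLAIM (what is proved, stated in full; the proofs are below) =====
def Claim_equal_grab_caller_language : Prop := ∀ (caller_name : String), Dom_grab_caller_language caller_name → Spec_grab_caller_language caller_name (grab_caller_language caller_name)

-- ===== LEMMAS AND PROOFS =====

def pvDashed (t : List Char) : List Char := '-' :: t ++ ['-']

def pvShift (c : Int) (q : Int × Int) : Int × Int := (c + q.1, q.2)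

def pvLookup : List (List Char × Int) → List Char → Option Int
  | [], _ => none
  | p :: rest, t => if p.1 = t then some p.2 else pvLookup rest t

def pvScan (ps : List (List Char × Int)) : List (List Char) → Option Int
  | [] => none
  | t :: ts =>
    match pvLookup ps t with
    | some k => some k
    | none => pvScan ps ts

def pvOccs (w : List Char) (ps : List (List Char × Int)) : List (Int × Int) :=
  ps.filterMap (fun p =>
    if PySem.Chars.find w (pvDashed p.1) = -1 then none
    else some (PySem.Chars.find w (pvDashed p.1), p.2))

def pvAview (ps : List (List Char × Int)) (s : List Char) : Option Int :=
  let occ := pvOccs ('-' :: s ++ ['-']) ps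
  if occ = [] then none
  else (PySem.List.pyGet? (PySem.List.sorted occ (fun x => x.1) false) 0).map (fun x => x.2)

def pvMSplit (cur : List Char) : List Char → List (List Char)
  | [] => [cur]
  | c :: rest => if c = '-' then cur :: pvMSplit [] rest else pvMSplit (cur ++ [c]) rest

def pvBview (ps : List (List Char × Int)) (s : List Char) : Option Int :=
  pvScan ps (pvMSplit [] ('-' :: s ++ ['-']))

lemma pvAview_eq (ps : List (List Char × Int)) (s : List Char) :
    pvAview ps s = if pvOccs ('-' :: s ++ ['-']) ps = [] then none
      else (PySem.List.pyGet?
        (PySem.List.sorted (pvOccs ('-' :: s ++ ['-']) ps) (fun x => x.1) false) 0).map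
        (fun x => x.2) := rfl

-- split on '-' is the simple accumulator recursion pvMSplit
lemma pvGo_eq (fuel : Nat) : ∀ (l cur : List Char) (acc : List (List Char)),
    l.length < fuel →
    PySem.Chars.splitOn.go ['-'] fuel l cur acc = acc.reverse ++ pvMSplit cur.reverse l := by
  induction fuel with
  | zero => intro l cur acc h; omega
  | succ fuel ih =>
    intro l cur acc h
    cases l with
    | nil =>
      rw [PySem.Chars.splitOn.go]
      · simp [pvMSplit]
      · omega
    | cons c rest =>
      rw [PySem.Chars.splitOn.go]
      by_cases hc : c = '-'
      · rw [if_pos (by simp [List.isPrefixOf, hc])]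
        rw [show List.drop (['-'] : List Char).length (c :: rest) = rest from rfl]
        rw [ih rest [] (cur.reverse :: acc) (by simp at h ⊢; omega)]
        simp [pvMSplit, hc]
      · rw [if_neg (by simp [List.isPrefixOf]; exact fun h' => hc h'.symm)]
        rw [ih rest (c :: cur) acc (by simp at h ⊢; omega)]
        simp [pvMSplit, hc]

lemma pvSplitOn_eq (s : List Char) : PySem.Chars.splitOn s ['-'] = pvMSplit [] s := by
  rw [show PySem.Chars.splitOn s ['-'] = PySem.Chars.splitOn.go ['-'] (s.length + 1) s [] [] from rfl]
  rw [pvGo_eq (s.length + 1) s [] [] (by omega)]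
  simp

lemma pvMSplit_dash (a : List Char) (ha : '-' ∉ a) :
    ∀ cur x, pvMSplit cur (a ++ '-' :: x) = (cur ++ a) :: pvMSplit [] x := by
  induction a with
  | nil => intro cur x; simp [pvMSplit]
  | cons c rest ih =>
    intro cur x
    have hc : c ≠ '-' := fun h => ha (h ▸ List.mem_cons_self)
    have hrest : '-' ∉ rest := fun h => ha (List.mem_cons_of_mem _ h)
    simp only [List.cons_append, pvMSplit, if_neg (fun h => hc h)]
    rw [ih hrest]
    simp

-- lookup facts
lemma pvLookup_eq_none_iff (ps : List (List Char × Int)) (t : List Char) :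
    pvLookup ps t = none ↔ ∀ p ∈ ps, p.1 ≠ t := by
  induction ps with
  | nil => simp [pvLookup]
  | cons p rest ih =>
    by_cases h : p.1 = t
    · simp [pvLookup, h]
    · simp [pvLookup, h, ih]

lemma pvLookup_eq_some (ps : List (List Char × Int)) (t : List Char) (k : Int)
    (h : pvLookup ps t = some k) : ∃ p ∈ ps, p.1 = t ∧ p.2 = k := by
  induction ps with
  | nil => simp [pvLookup] at h
  | cons p rest ih =>
    by_cases hp : p.1 = t
    · simp only [pvLookup, if_pos hp] at h
      exact ⟨p, List.mem_cons_self, hp, by simpa using h⟩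
    · simp only [pvLookup, if_neg hp] at h
      obtain ⟨q, hq, h1, h2⟩ := ih h
      exact ⟨q, List.mem_cons_of_mem _ hq, h1, h2⟩

lemma pvDict_get?_eq (ps : List (List Char × Int)) (t : List Char) :
    (PySem.Dict.mk ps).get? t = pvLookup ps t := by
  induction ps with
  | nil => rfl
  | cons p rest ih =>
    rw [show (PySem.Dict.mk (p :: rest)) = PySem.Dict.mk ((p.1, p.2) :: rest) by rfl,
      PySem.Dict.get?_mk_cons]
    simp only [pvLookup, beq_iff_eq, ih]

lemma pvFirstTag_eq (ts : List (List Char)) : pvFirstTag ts = pvScan pvPairsL ts := by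
  induction ts with
  | nil => rfl
  | cons t ts ih =>
    simp only [pvFirstTag, pvScan, pvTagToKey, pvDict_get?_eq, ih]

lemma pvAlt_eq (s : String) : grab_caller_language_alt s = pvBview pvPairsL s.toList := by
  unfold grab_caller_language_alt pvBview
  rw [pvSplitOn_eq, pvFirstTag_eq]

-- A's nested accumulation loop is pvOccs
lemma pvFoldInner (w : List Char) (k : Int) :
    ∀ (ts : List (List Char)) (acc : List (Int × Int)),
    ts.foldl (fun acc tag =>
      if PySem.Chars.find w (pvDashed tag) ≠ -1 then
        acc ++ [(PySem.Chars.find w (pvDashed tag), k)] else acc) acc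
    = acc ++ pvOccs w (ts.map (fun t => (t, k))) := by
  intro ts
  induction ts with
  | nil => intro acc; simp [pvOccs]
  | cons t ts ih =>
    intro acc
    by_cases h : PySem.Chars.find w (pvDashed t) = -1
    · simp only [List.foldl_cons, if_neg (not_not_intro h)]
      rw [ih]
      simp [pvOccs, h]
    · simp only [List.foldl_cons, if_pos h]
      rw [ih]
      simp [pvOccs, h]

lemma pvFoldOuter (w : List Char) :
    ∀ (L : List (Int × List (List Char))) (acc : List (Int × Int)),
    L.foldl (fun acc kv =>
      kv.2.foldl (fun acc tag =>
        if PySem.Chars.find w (pvDashed tag) ≠ -1 then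
          acc ++ [(PySem.Chars.find w (pvDashed tag), kv.1)] else acc) acc) acc
    = acc ++ pvOccs w (L.flatMap (fun kv => kv.2.map (fun t => (t, kv.1)))) := by
  intro L
  induction L with
  | nil => intro acc; simp [pvOccs]
  | cons kv L ih =>
    intro acc
    simp only [List.foldl_cons]
    rw [pvFoldInner, ih, List.flatMap_cons]
    simp [pvOccs, List.filterMap_append]

lemma pvA_eq (s : String) : grab_caller_language s = pvAview pvPairsL s.toList := by
  unfold grab_caller_language pvAview
  simp only []
  rw [show (fun (acc : List (Int × Int)) (kv : Int × List (List Char)) =>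
      kv.2.foldl (fun acc tag =>
        let tag_with_dashes : List Char := '-' :: tag ++ ['-']
        let index := PySem.Chars.find ('-' :: s.toList ++ ['-']) tag_with_dashes
        if index ≠ -1 then acc ++ [(index, kv.1)] else acc) acc)
    = (fun (acc : List (Int × Int)) (kv : Int × List (List Char)) =>
      kv.2.foldl (fun acc tag =>
        if PySem.Chars.find ('-' :: s.toList ++ ['-']) (pvDashed tag) ≠ -1 then
          acc ++ [(PySem.Chars.find ('-' :: s.toList ++ ['-']) (pvDashed tag), kv.1)]
        else acc) acc) from rfl]
  rw [pvFoldOuter]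
  rw [show pvCallerLanguages.flatMap (fun kv => kv.2.map (fun t => (t, kv.1))) = pvPairsL from rfl]
  simp

-- find/prefix characterizations
lemma pvPrefixTag : ∀ (t a : List Char), '-' ∉ t → '-' ∉ a → ∀ x,
    t ++ ['-'] <+: a ++ '-' :: x → t = a := by
  intro t
  induction t with
  | nil =>
    intro a _ ha x h
    cases a with
    | nil => rfl
    | cons c a' =>
      simp only [List.nil_append, List.cons_append, List.cons_prefix_cons] at h
      exact absurd (h.1 ▸ List.mem_cons_self) ha
  | cons c t' ih =>
    intro a ht ha x h
    cases a with
    | nil =>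
      simp only [List.cons_append, List.nil_append, List.cons_prefix_cons] at h
      exact absurd (h.1 ▸ List.mem_cons_self) ht
    | cons c0 a' =>
      simp only [List.cons_append, List.cons_prefix_cons] at h
      have ht' : '-' ∉ t' := fun hm => ht (List.mem_cons_of_mem _ hm)
      have ha' : '-' ∉ a' := fun hm => ha (List.mem_cons_of_mem _ hm)
      rw [h.1, ih a' ht' ha' x h.2]

lemma pvFzero (w sub : List Char) (h : sub <+: w) : PySem.Chars.find w sub = 0 := by
  have h0 : 0 ≤ PySem.Chars.find w sub := (PySem.Chars.find_nonneg_iff w sub).2 h.isInfix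
  obtain ⟨_, hmin⟩ := PySem.Chars.find_spec h0
  by_contra hne
  have hpos : 0 < (PySem.Chars.find w sub).toNat := by omega
  exact hmin 0 hpos (by simpa using h)

lemma pvFnone (w sub : List Char) (h : ∀ j : Nat, ¬ sub <+: w.drop j) :
    PySem.Chars.find w sub = -1 := by
  rw [PySem.Chars.find_eq_neg_one_iff]
  intro hinf
  obtain ⟨j, hj⟩ := (PySem.Chars.exists_prefix_drop_iff_isIn sub w).2
    ((PySem.Chars.isIn_iff_infix sub w).2 hinf)
  exact h j hj

lemma pvFshift (w sub : List Char) (c : Nat)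
    (h : ∀ j : Nat, j < c → ¬ sub <+: w.drop j) :
    PySem.Chars.find w sub =
      if PySem.Chars.find (w.drop c) sub = -1 then -1
      else (c : Int) + PySem.Chars.find (w.drop c) sub := by
  by_cases hn : PySem.Chars.find (w.drop c) sub = -1
  · rw [if_pos hn]
    apply pvFnone
    intro j
    by_cases hj : j < c
    · exact h j hj
    · intro hp
      have hd : List.drop j w = List.drop (j - c) (List.drop c w) := by
        rw [List.drop_drop]; congr 1; omega
      rw [PySem.Chars.find_eq_neg_one_iff] at hn
      apply hn
      obtain ⟨j', hj'⟩ : ∃ j', sub <+: (w.drop c).drop j' := ⟨j - c, hd ▸ hp⟩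
      exact (PySem.Chars.isIn_iff_infix sub (w.drop c)).1
        ((PySem.Chars.exists_prefix_drop_iff_isIn sub (w.drop c)).1 ⟨j', hj'⟩)
  · rw [if_neg hn]
    have h0' : 0 ≤ PySem.Chars.find (w.drop c) sub := by
      have := PySem.Chars.neg_one_le_find (w.drop c) sub; omega
    obtain ⟨hp', hmin'⟩ := PySem.Chars.find_spec h0'
    set f' : Nat := (PySem.Chars.find (w.drop c) sub).toNat with hf'
    have hpcf : sub <+: w.drop (c + f') := by
      rw [← List.drop_drop]
      exact (by simpa [Nat.add_comm] using hp')
    have h0 : 0 ≤ PySem.Chars.find w sub := by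
      rw [PySem.Chars.find_nonneg_iff]
      exact (PySem.Chars.isIn_iff_infix sub w).1
        ((PySem.Chars.exists_prefix_drop_iff_isIn sub w).1 ⟨c + f', hpcf⟩)
    obtain ⟨hp, hmin⟩ := PySem.Chars.find_spec h0
    set F : Nat := (PySem.Chars.find w sub).toNat with hF
    have hFge : c ≤ F := by
      by_contra hlt
      exact h F (by omega) hp
    have hge : f' ≤ F - c := by
      by_contra hlt
      have : sub <+: (w.drop c).drop (F - c) := by
        rw [List.drop_drop, show c + (F - c) = F from by omega]
        exact hp
      exact hmin' (F - c) (by omega) this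
    have hle : F ≤ c + f' := by
      by_contra hlt
      exact hmin (c + f') (by omega) hpcf
    have hFeq : F = c + f' := by omega
    have : PySem.Chars.find w sub = (F : Int) := by omega
    rw [this, hFeq]
    push_cast
    omega

lemma pvNoMid (a r t : List Char) (ha : '-' ∉ a) :
    ∀ j : Nat, 1 ≤ j → j ≤ a.length → ¬ pvDashed t <+: ('-' :: a ++ r).drop j := by
  intro j h1 h2 hp
  have hd : ('-' :: a ++ r).drop j = (a ++ r).drop (j - 1) := by
    cases j with
    | zero => omega
    | succ j' => simp [List.drop_succ_cons]
  have hj1 : j - 1 < a.length := by omega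
  have hd2 : (a ++ r).drop (j - 1) = a.drop (j - 1) ++ r :=
    List.drop_append_of_le_length (by omega)
  have hd3 : a.drop (j - 1) = a[j - 1] :: a.drop (j - 1 + 1) := List.drop_eq_getElem_cons hj1
  rw [hd, hd2, hd3] at hp
  simp only [pvDashed, List.cons_append, List.cons_prefix_cons] at hp
  exact ha (hp.1 ▸ List.getElem_mem hj1)

lemma pvFindNoDash (a t : List Char) (ha : '-' ∉ a) (ht : '-' ∉ t) (hne : t ≠ a) :
    PySem.Chars.find ('-' :: a ++ ['-']) (pvDashed t) = -1 := by
  apply pvFnone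
  intro j
  by_cases hj0 : j = 0
  · subst hj0
    intro hp
    simp only [List.drop_zero, pvDashed, List.cons_append, List.cons_prefix_cons] at hp
    exact hne (pvPrefixTag t a ht ha [] hp.2)
  · by_cases hja : j ≤ a.length
    · exact pvNoMid a ['-'] t ha j (by omega) hja
    · intro hp
      have hlen := hp.length_le
      have : (('-' :: a ++ ['-']).drop j).length ≤ 1 := by
        simp only [List.length_drop, List.length_append, List.length_cons]
        simp; omega
      simp [pvDashed] at hlen
      omega

-- stable sort commutes with shifting every key by a constant
lemma pvInsertShift (c : Int) (x : Int × Int) :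
    ∀ ys, PySem.List.insertBy (fun a b => decide (a.1 < b.1)) (pvShift c x) (ys.map (pvShift c))
      = (PySem.List.insertBy (fun a b => decide (a.1 < b.1)) x ys).map (pvShift c) := by
  intro ys
  induction ys with
  | nil => simp [PySem.List.insertBy, pvShift]
  | cons y ys ih =>
    simp only [List.map_cons, PySem.List.insertBy]
    have hcond : (decide ((pvShift c x).1 < (pvShift c y).1)) = decide (x.1 < y.1) := by
      simp [pvShift]
    rw [hcond]
    by_cases h : x.1 < y.1
    · simp [h]
    · simp only [decide_eq_true_eq, if_neg h, List.map_cons, ih]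

lemma pvSortShift (c : Int) (l : List (Int × Int)) :
    PySem.List.sorted (l.map (pvShift c)) (fun x => x.1) false
      = (PySem.List.sorted l (fun x => x.1) false).map (pvShift c) := by
  rw [PySem.List.sorted_eq_foldl_insertBy, PySem.List.sorted_eq_foldl_insertBy, List.foldl_map]
  suffices h : ∀ (acc : List (Int × Int)),
      l.foldl (fun acc x => PySem.List.insertBy (fun a b => decide (a.1 < b.1)) (pvShift c x) acc)
        (acc.map (pvShift c))
      = (l.foldl (fun acc x => PySem.List.insertBy (fun a b => decide (a.1 < b.1)) x acc) acc).map
          (pvShift c) by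
    simpa using h []
  induction l with
  | nil => intro acc; rfl
  | cons x l ih =>
    intro acc
    simp only [List.foldl_cons]
    rw [pvInsertShift c x acc, ih]

-- the no-dash (single-token) case
lemma pvNoDashCase (ps : List (List Char × Int))
    (H1 : ∀ p ∈ ps, p.1 ≠ [] ∧ '-' ∉ p.1)
    (H2 : ∀ p ∈ ps, ∀ q ∈ ps, p.1 = q.1 → p.2 = q.2)
    (a : List Char) (ha : '-' ∉ a) : pvAview ps a = pvBview ps a := by
  have hnil : pvLookup ps [] = none :=
    (pvLookup_eq_none_iff ps []).2 (fun p hp => (H1 p hp).1)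
  -- tokens of '-' ++ a ++ '-' are ["", a, ""]
  have htok : pvMSplit [] ('-' :: a ++ ['-']) = [[], a, []] := by
    have h1 : ('-' :: a ++ ['-'] : List Char) = [] ++ '-' :: (a ++ '-' :: []) := by simp
    rw [h1, pvMSplit_dash [] (by simp) [] (a ++ '-' :: []), pvMSplit_dash a ha [] []]
    rfl
  have hB : pvBview ps a = match pvLookup ps a with
      | some k => some k
      | none => none := by
    unfold pvBview
    rw [htok]
    cases hl : pvLookup ps a with
    | some k => simp [pvScan, hnil, hl]
    | none => simp [pvScan, hnil, hl]
  -- occurrences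
  have hocc : pvOccs ('-' :: a ++ ['-']) ps
      = ps.filterMap (fun p => if p.1 = a then some ((0 : Int), p.2) else none) := by
    unfold pvOccs
    apply List.filterMap_congr
    intro p hp
    obtain ⟨hne, hnd⟩ := H1 p hp
    by_cases hpa : p.1 = a
    · have h0 : PySem.Chars.find ('-' :: a ++ ['-']) (pvDashed p.1) = 0 := by
        rw [hpa]
        exact pvFzero _ _ (by simp [pvDashed])
      rw [h0, if_pos hpa]
      norm_num
    · rw [pvFindNoDash a p.1 ha hnd hpa, if_neg hpa]
      simp
  cases hl : pvLookup ps a with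
  | none =>
    have hforall := (pvLookup_eq_none_iff ps a).1 hl
    have hempty : pvOccs ('-' :: a ++ ['-']) ps = [] := by
      rw [hocc]
      exact List.filterMap_eq_nil_iff.2 (fun p hp => if_neg (hforall p hp))
    rw [hB, hl, pvAview_eq, if_pos hempty]
  | some k =>
    obtain ⟨p0, hp0, h01, h02⟩ := pvLookup_eq_some ps a k hl
    have hmem : ((0 : Int), k) ∈ pvOccs ('-' :: a ++ ['-']) ps := by
      rw [hocc]
      exact List.mem_filterMap.2 ⟨p0, hp0, by rw [if_pos h01, h02]⟩
    have hoccne : pvOccs ('-' :: a ++ ['-']) ps ≠ [] := by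
      intro h; rw [h] at hmem; simp at hmem
    have hall : ∀ q ∈ pvOccs ('-' :: a ++ ['-']) ps, q = ((0 : Int), k) := by
      rw [hocc]
      intro q hq
      obtain ⟨p, hp, hif⟩ := List.mem_filterMap.1 hq
      by_cases hpa : p.1 = a
      · rw [if_pos hpa] at hif
        have hk := H2 p hp p0 hp0 (hpa.trans h01.symm)
        cases hif
        rw [hk, h02]
      · rw [if_neg hpa] at hif; cases hif
    have hsne : PySem.List.sorted (pvOccs ('-' :: a ++ ['-']) ps) (fun x => x.1) false ≠ [] := by
      rw [ne_eq, PySem.List.sorted_eq_nil_iff]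
      exact hoccne
    obtain ⟨m, tl, hmtl⟩ := List.exists_cons_of_ne_nil hsne
    have hm : m = ((0 : Int), k) := by
      apply hall
      rw [← PySem.List.mem_sorted _ (fun x : Int × Int => x.1) false, hmtl]
      exact List.mem_cons_self
    rw [hB, hl, pvAview_eq, if_neg hoccne, hmtl, hm]
    simp [PySem.List.pyGet?, PySem.List.pyIdx?]

-- the step case: s = a ++ '-' :: s' with '-' ∉ a
lemma pvDashCase (ps : List (List Char × Int))
    (H1 : ∀ p ∈ ps, p.1 ≠ [] ∧ '-' ∉ p.1)
    (H2 : ∀ p ∈ ps, ∀ q ∈ ps, p.1 = q.1 → p.2 = q.2)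
    (a s' : List Char) (ha : '-' ∉ a)
    (IH : pvAview ps s' = pvBview ps s') :
    pvAview ps (a ++ '-' :: s') = pvBview ps (a ++ '-' :: s') := by
  have hnil : pvLookup ps [] = none :=
    (pvLookup_eq_none_iff ps []).2 (fun p hp => (H1 p hp).1)
  have htokS : pvMSplit [] ('-' :: (a ++ '-' :: s') ++ ['-'])
      = [] :: a :: pvMSplit [] (s' ++ ['-']) := by
    have h1 : ('-' :: (a ++ '-' :: s') ++ ['-'] : List Char)
        = [] ++ '-' :: (a ++ '-' :: (s' ++ ['-'])) := by simp
    rw [h1, pvMSplit_dash [] (by simp) [] (a ++ '-' :: (s' ++ ['-'])),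
      pvMSplit_dash a ha [] (s' ++ ['-'])]
    simp
  have htokS' : pvMSplit [] ('-' :: s' ++ ['-']) = [] :: pvMSplit [] (s' ++ ['-']) := by
    have h1 : ('-' :: s' ++ ['-'] : List Char) = [] ++ '-' :: (s' ++ ['-']) := by simp
    rw [h1, pvMSplit_dash [] (by simp) [] (s' ++ ['-'])]
    simp
  have hw : ('-' :: (a ++ '-' :: s') ++ ['-'] : List Char)
      = '-' :: a ++ '-' :: (s' ++ ['-']) := by simp
  cases hl : pvLookup ps a with
  | some k =>
    have hB : pvBview ps (a ++ '-' :: s') = some k := by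
      unfold pvBview
      rw [htokS]
      simp [pvScan, hnil, hl]
    obtain ⟨p0, hp0, h01, h02⟩ := pvLookup_eq_some ps a k hl
    have hfind0 : PySem.Chars.find ('-' :: (a ++ '-' :: s') ++ ['-']) (pvDashed p0.1) = 0 := by
      apply pvFzero
      rw [h01, hw]
      show ('-' :: a ++ ['-'] : List Char) <+: '-' :: a ++ '-' :: (s' ++ ['-'])
      simp only [List.cons_append, List.cons_prefix_cons]
      refine ⟨by trivial, ?_⟩
      rw [List.prefix_append_right_inj]
      exact ⟨s' ++ ['-'], by simp⟩
    have hmem : ((0 : Int), k) ∈ pvOccs ('-' :: (a ++ '-' :: s') ++ ['-']) ps := by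
      apply List.mem_filterMap.2
      exact ⟨p0, hp0, by rw [hfind0, if_neg (by norm_num : ¬((0 : Int) = -1)), h02]⟩
    have hnonneg : ∀ q ∈ pvOccs ('-' :: (a ++ '-' :: s') ++ ['-']) ps, 0 ≤ q.1 := by
      intro q hq
      obtain ⟨p, hp, hif⟩ := List.mem_filterMap.1 hq
      by_cases hqf : PySem.Chars.find ('-' :: (a ++ '-' :: s') ++ ['-']) (pvDashed p.1) = -1
      · rw [if_pos hqf] at hif; cases hif
      · rw [if_neg hqf] at hif
        cases hif
        show (0 : Int) ≤ PySem.Chars.find ('-' :: (a ++ '-' :: s') ++ ['-']) (pvDashed p.1)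
        have := PySem.Chars.neg_one_le_find ('-' :: (a ++ '-' :: s') ++ ['-']) (pvDashed p.1)
        omega
    have hoccne : pvOccs ('-' :: (a ++ '-' :: s') ++ ['-']) ps ≠ [] := by
      intro h; rw [h] at hmem; simp at hmem
    have hsne : PySem.List.sorted (pvOccs ('-' :: (a ++ '-' :: s') ++ ['-']) ps)
        (fun x => x.1) false ≠ [] := by
      rw [ne_eq, PySem.List.sorted_eq_nil_iff]
      exact hoccne
    obtain ⟨m, tl, hmtl⟩ := List.exists_cons_of_ne_nil hsne
    have hmmem : m ∈ pvOccs ('-' :: (a ++ '-' :: s') ++ ['-']) ps := by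
      rw [← PySem.List.mem_sorted _ (fun x : Int × Int => x.1) false, hmtl]
      exact List.mem_cons_self
    have hm1 : m.1 = 0 := by
      have hle := PySem.List.key_head_sorted_le _ (fun x : Int × Int => x.1) hmtl
        ((0 : Int), k) hmem
      have hge := hnonneg m hmmem
      simp at hle
      omega
    have hm2 : m.2 = k := by
      obtain ⟨p, hp, hif⟩ := List.mem_filterMap.1 hmmem
      by_cases hqf : PySem.Chars.find ('-' :: (a ++ '-' :: s') ++ ['-']) (pvDashed p.1) = -1
      · rw [if_pos hqf] at hif; cases hif
      · rw [if_neg hqf] at hif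
        have hpair := Option.some.inj hif
        have hfindm : PySem.Chars.find ('-' :: (a ++ '-' :: s') ++ ['-']) (pvDashed p.1) = 0 := by
          rw [← hpair] at hm1
          exact hm1
        have h0le : 0 ≤ PySem.Chars.find ('-' :: (a ++ '-' :: s') ++ ['-']) (pvDashed p.1) := by
          omega
        obtain ⟨hpref, -⟩ := PySem.Chars.find_spec h0le
        rw [hfindm] at hpref
        simp only [Int.toNat_zero, List.drop_zero] at hpref
        rw [hw] at hpref
        have hpa : p.1 = a := by
          apply pvPrefixTag p.1 a (H1 p hp).2 ha (s' ++ ['-'])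
          simpa [pvDashed, List.cons_prefix_cons] using hpref
        have hk : p.2 = k := (H2 p hp p0 hp0 (hpa.trans h01.symm)).trans h02
        rw [← hpair]
        exact hk
    rw [hB, pvAview_eq, if_neg hoccne, hmtl]
    simp [PySem.List.pyGet?, PySem.List.pyIdx?, hm2]
  | none =>
    have hne := (pvLookup_eq_none_iff ps a).1 hl
    have hB : pvBview ps (a ++ '-' :: s') = pvBview ps s' := by
      unfold pvBview
      rw [htokS, htokS']
      simp [pvScan, hnil, hl]
    have hfshift : ∀ p ∈ ps,
        PySem.Chars.find ('-' :: (a ++ '-' :: s') ++ ['-']) (pvDashed p.1)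
        = if PySem.Chars.find ('-' :: s' ++ ['-']) (pvDashed p.1) = -1 then -1
          else ((a.length + 1 : Nat) : Int)
            + PySem.Chars.find ('-' :: s' ++ ['-']) (pvDashed p.1) := by
      intro p hp
      have hdrop : ('-' :: (a ++ '-' :: s') ++ ['-'] : List Char).drop (a.length + 1)
          = '-' :: s' ++ ['-'] := by
        rw [show ('-' :: (a ++ '-' :: s') ++ ['-'] : List Char)
          = ('-' :: a) ++ ('-' :: s' ++ ['-']) by simp]
        rw [show a.length + 1 = ('-' :: a : List Char).length by simp]
        exact List.drop_left
      rw [← hdrop]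
      apply pvFshift
      intro j hj hpref
      rcases Nat.eq_zero_or_pos j with hj0 | hj1
      · subst hj0
        simp only [List.drop_zero] at hpref
        rw [hw] at hpref
        have hpa : p.1 = a := by
          apply pvPrefixTag p.1 a (H1 p hp).2 ha (s' ++ ['-'])
          simpa [pvDashed, List.cons_prefix_cons] using hpref
        exact hne p hp hpa
      · have hja : j ≤ a.length := by omega
        have := pvNoMid a ('-' :: (s' ++ ['-'])) p.1 ha j hj1 hja
        apply this
        rw [show ('-' :: a ++ '-' :: (s' ++ ['-']) : List Char)
          = '-' :: (a ++ '-' :: s') ++ ['-'] by simp]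
        exact hpref
    have hocc : pvOccs ('-' :: (a ++ '-' :: s') ++ ['-']) ps
        = (pvOccs ('-' :: s' ++ ['-']) ps).map (pvShift ((a.length + 1 : Nat) : Int)) := by
      unfold pvOccs
      rw [List.map_filterMap]
      apply List.filterMap_congr
      intro p hp
      rw [hfshift p hp]
      by_cases h' : PySem.Chars.find ('-' :: s' ++ ['-']) (pvDashed p.1) = -1
      · simp only [h']
        simp
      · have hge : 0 ≤ PySem.Chars.find ('-' :: s' ++ ['-']) (pvDashed p.1) := by
          have := PySem.Chars.neg_one_le_find ('-' :: s' ++ ['-']) (pvDashed p.1)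
          omega
        have hcond : ¬(((a.length + 1 : Nat) : Int)
            + PySem.Chars.find ('-' :: s' ++ ['-']) (pvDashed p.1) = -1) := by
          push_cast
          omega
        rw [if_neg h', if_neg hcond, if_neg h']
        simp [pvShift]
    have hA : pvAview ps (a ++ '-' :: s') = pvAview ps s' := by
      rw [pvAview_eq, pvAview_eq, hocc]
      by_cases h0 : pvOccs ('-' :: s' ++ ['-']) ps = []
      · rw [if_pos (by rw [h0]; rfl), if_pos h0]
      · have h1 : (pvOccs ('-' :: s' ++ ['-']) ps).map
            (pvShift ((a.length + 1 : Nat) : Int)) ≠ [] := by simpa using h0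
        rw [if_neg h1, if_neg h0, pvSortShift]
        have hsne : PySem.List.sorted (pvOccs ('-' :: s' ++ ['-']) ps)
            (fun x => x.1) false ≠ [] := by
          rw [ne_eq, PySem.List.sorted_eq_nil_iff]
          exact h0
        obtain ⟨m, tl, hmtl⟩ := List.exists_cons_of_ne_nil hsne
        rw [hmtl, List.map_cons]
        simp [PySem.List.pyGet?, PySem.List.pyIdx?, pvShift]
    rw [hA, IH, hB]

lemma pvDropWhileHead (p : Char → Bool) : ∀ (l : List Char) (c : Char) (t : List Char),
    l.dropWhile p = c :: t → p c = false := by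
  intro l
  induction l with
  | nil => intro c t h; simp [List.dropWhile] at h
  | cons x xs ih =>
    intro c t h
    by_cases hx : p x
    · rw [List.dropWhile_cons_of_pos hx] at h
      exact ih c t h
    · rw [List.dropWhile_cons_of_neg hx] at h
      cases h
      simpa using hx

lemma pvCore (ps : List (List Char × Int))
    (H1 : ∀ p ∈ ps, p.1 ≠ [] ∧ '-' ∉ p.1)
    (H2 : ∀ p ∈ ps, ∀ q ∈ ps, p.1 = q.1 → p.2 = q.2) :
    ∀ (n : Nat) (s : List Char), s.length ≤ n → pvAview ps s = pvBview ps s := by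
  intro n
  induction n with
  | zero =>
    intro s hs
    have : s = [] := List.length_eq_zero_iff.1 (by omega)
    subst this
    exact pvNoDashCase ps H1 H2 [] (by simp)
  | succ n ih =>
    intro s hs
    have hsplit : s.takeWhile (fun c => c != '-') ++ s.dropWhile (fun c => c != '-') = s :=
      List.takeWhile_append_dropWhile
    have hnda : '-' ∉ s.takeWhile (fun c => c != '-') := by
      intro hm
      have := List.mem_takeWhile_imp hm
      simp at this
    cases hr : s.dropWhile (fun c => c != '-') with
    | nil =>
      have hs' : s = s.takeWhile (fun c => c != '-') := by
        conv_lhs => rw [← hsplit, hr, List.append_nil]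
      have := pvNoDashCase ps H1 H2 _ hnda
      rwa [← hs'] at this
    | cons c s' =>
      have hc : c = '-' := by
        have := pvDropWhileHead (fun c => c != '-') s c s' hr
        simpa using this
      have hs2 : s = s.takeWhile (fun c => c != '-') ++ '-' :: s' := by
        conv_lhs => rw [← hsplit, hr, hc]
      have hlen : s'.length ≤ n := by
        have := congrArg List.length hs2
        simp at this
        omega
      have := pvDashCase ps H1 H2 _ s' hnda (ih s' hlen)
      rwa [← hs2] at this

-- ===== VERDICT (by name: the statement is the Claim_ definition above) =====
theorem grab_caller_language_spec : Claim_equal_grab_caller_language := by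
  intro s _
  unfold Spec_grab_caller_language
  rw [pvA_eq, pvAlt_eq]
  exact pvCore pvPairsL (by decide) (by decide) s.toList.length s.toList le_rfl
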